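-- pv_equiv track=rewrite | github.com/gmahone/daily_python | basic_sequence_practice.py | sum_of_n
-- ===== SOURCE A (Python) =====
-- def sum_of_n(n):
--     if n >= 0:
--         index_list = list(range(0,n+1))
--         result = [sum(index_list[0:n+1]) for n in index_list]
--     else:
--         index_list = list(range(n,1))[::-1]
--         result = [sum(index_list[0:n+1]) for n in list(range(0,-n+1))]
--     return result
-- ===== SOURCE B (Python) =====
-- def sum_of_n(n):
--     step = 1 if n >= 0 else -1
--     acc = 0
--     result = []
--     for k in range(abs(n) + 1):
--         acc += step * k
--         result.append(acc)
--     return result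
-- ===== Notes on version B (the rewrite author's own statement) =====
-- stated objective: faster
-- what changed: A builds the full 0..|n| list and re-sums a growing slice for every element (quadratic); B keeps one running accumulator and appends it in a single pass.
import Mathlib
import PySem

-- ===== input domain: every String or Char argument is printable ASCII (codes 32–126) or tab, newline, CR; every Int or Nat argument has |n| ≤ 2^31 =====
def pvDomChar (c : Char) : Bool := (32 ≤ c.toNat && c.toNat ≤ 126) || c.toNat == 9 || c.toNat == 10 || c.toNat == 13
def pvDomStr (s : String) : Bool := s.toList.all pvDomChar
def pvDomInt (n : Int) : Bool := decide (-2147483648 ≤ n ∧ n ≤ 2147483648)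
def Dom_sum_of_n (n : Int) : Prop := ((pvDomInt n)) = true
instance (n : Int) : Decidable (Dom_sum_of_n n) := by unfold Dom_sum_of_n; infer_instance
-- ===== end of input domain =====

-- B replaces A's quadratic slice-and-sum comprehension by a single-pass running accumulator (asymptotically faster).


-- ===== PORT A =====
def sum_of_n (n : Int) : List Int :=
  if n ≥ 0 then
    let indexList := PySem.List.pyRange 0 (n + 1) 1
    indexList.map (fun m => (PySem.List.slice indexList (some 0) (some (m + 1))).sum)
  else
    -- list(range(n,1))[::-1]: [::-1] is reverse (PySem.List.slice?_none_none_neg_one)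
    let indexList := (PySem.List.pyRange n 1 1).reverse
    (PySem.List.pyRange 0 (-n + 1) 1).map
      (fun m => (PySem.List.slice indexList (some 0) (some (m + 1))).sum)

-- ===== PORT B =====
def sum_of_n_alt (n : Int) : List Int :=
  let step : Int := if n ≥ 0 then 1 else -1
  ((PySem.List.pyRange 0 ((n.natAbs : Int) + 1) 1).foldl
      (fun (s : Int × List Int) k => (s.1 + step * k, s.2 ++ [s.1 + step * k]))
      (0, [])).2

-- ===== PRECONDITION & SPEC =====
def Spec_sum_of_n (n : Int) (out : List Int) : Prop := out = sum_of_n_alt n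
instance (n : Int) (out : List Int) : Decidable (Spec_sum_of_n n out) := by unfold Spec_sum_of_n; infer_instance

-- ===== CLAIM (what is proved, stated in full; the proofs are below) =====
def Claim_equal_sum_of_n : Prop := ∀ (n : Int), Dom_sum_of_n n → Spec_sum_of_n n (sum_of_n n)

-- ===== LEMMAS AND PROOFS =====

-- pvS N = 0 + 1 + … + N, the sum A's slices compute
def pvS (N : Nat) : Int := ((List.range (N + 1)).map (fun i : Nat => (i : Int))).sum

-- running prefix sums of step·k over a list, starting from acc (B's accumulator trace)
def pvPsums (step acc : Int) : List Int → List Int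
  | [] => []
  | k :: t => (acc + step * k) :: pvPsums step (acc + step * k) t

theorem pvFoldl_scan (step : Int) (l : List Int) (acc : Int) (out : List Int) :
    l.foldl (fun (s : Int × List Int) k => (s.1 + step * k, s.2 ++ [s.1 + step * k])) (acc, out)
      = (acc + step * l.sum, out ++ pvPsums step acc l) := by
  induction l generalizing acc out with
  | nil => simp [pvPsums]
  | cons k t ih =>
      simp only [List.foldl_cons, ih, pvPsums, List.sum_cons, Prod.mk.injEq]
      refine ⟨by ring, by simp⟩

theorem pvPsums_append (step acc x : Int) (l : List Int) :
    pvPsums step acc (l ++ [x]) = pvPsums step acc l ++ [acc + step * l.sum + step * x] := by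
  induction l generalizing acc with
  | nil => simp [pvPsums]
  | cons k t ih =>
      simp only [List.cons_append, pvPsums, ih, List.sum_cons]
      ring_nf

theorem pvS_succ (N : Nat) : pvS (N + 1) = pvS N + (N + 1 : Int) := by
  simp [pvS, List.range_succ]
  ring

theorem pvPsums_range (step : Int) (N : Nat) :
    pvPsums step 0 ((List.range (N + 1)).map (fun i : Nat => (i : Int)))
      = (List.range (N + 1)).map (fun k => step * pvS k) := by
  induction N with
  | zero => simp [List.range_succ, pvPsums, pvS]
  | succ N ih =>
      rw [List.range_succ (n := N + 1), List.map_append, List.map_append]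
      simp only [List.map_cons, List.map_nil]
      rw [pvPsums_append, ih]
      congr 1
      simp only [List.cons.injEq, and_true]
      have hs : ((List.range (N + 1)).map (fun i : Nat => (i : Int))).sum = pvS N := rfl
      rw [hs, pvS_succ]
      push_cast
      ring

theorem pvRange_cast (M : Nat) :
    PySem.List.pyRange 0 ((M : Int)) 1 = (List.range M).map (fun i : Nat => (i : Int)) := by
  rw [PySem.List.pyRange_one]
  simp

-- A's per-element slice sum over the cast range list
theorem pvSlice_sum (N k : Nat) (hk : k < N + 1) (f : Nat → Int) :
    (PySem.List.slice ((List.range (N + 1)).map (fun i : Nat => f i)) (some 0)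
        (some ((k : Int) + 1))).sum
      = ((List.range (k + 1)).map (fun i : Nat => f i)).sum := by
  have h1 : ((k : Int) + 1) = ((k + 1 : Nat) : Int) := by push_cast; ring
  rw [h1, PySem.List.slice_zero_start, PySem.List.slice_to_natCast, ← List.map_take,
    List.take_range]
  have h2 : min (k + 1) (N + 1) = k + 1 := by omega
  rw [h2]

theorem pvSum_neg (l : List Nat) :
    (l.map (fun i : Nat => -(i : Int))).sum = -((l.map (fun i : Nat => (i : Int))).sum) := by
  induction l with
  | nil => simp
  | cons a t ih => simp [ih]; ring

theorem pvRange_rev (N : Nat) :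
    (PySem.List.pyRange (-(N : Int)) 1 1).reverse
      = (List.range (N + 1)).map (fun i : Nat => -(i : Int)) := by
  have h : PySem.List.pyRange 0 (-(N : Int) - 1) (-1)
      = (PySem.List.pyRange (-(N : Int)) 1 1).reverse := by
    have := PySem.List.pyRange_neg_one_eq_reverse 0 (-(N : Int) - 1)
    simpa using this
  rw [← h, PySem.List.pyRange_neg_one]
  have h2 : (0 - (-(N : Int) - 1)).toNat = N + 1 := by omega
  rw [h2]
  simp

-- ===== VERDICT (by name: the statement is the Claim_ definition above) =====
theorem sum_of_n_spec : Claim_equal_sum_of_n := by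
  intro n _
  unfold Spec_sum_of_n sum_of_n sum_of_n_alt
  by_cases hn : n ≥ 0
  · -- positive branch: step = 1
    simp only [hn, if_pos]
    have hN : ((n.natAbs : Int) + 1) = ((n.natAbs + 1 : Nat) : Int) := by push_cast; ring
    have hn1 : (n + 1) = ((n.natAbs + 1 : Nat) : Int) := by omega
    rw [hN, hn1, pvRange_cast, pvFoldl_scan, pvPsums_range]
    simp only [List.nil_append, List.map_map]
    apply List.map_congr_left
    intro k hk
    have hk' : k < n.natAbs + 1 := List.mem_range.mp hk
    simp only [Function.comp]
    rw [pvSlice_sum n.natAbs k hk' (fun i : Nat => (i : Int))]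
    simp [pvS]
  · -- negative branch: step = -1
    simp only [hn, if_false]
    have hN : ((n.natAbs : Int) + 1) = ((n.natAbs + 1 : Nat) : Int) := by push_cast; ring
    have hn1 : (-n + 1) = ((n.natAbs + 1 : Nat) : Int) := by omega
    have hrev := pvRange_rev n.natAbs
    rw [show -((n.natAbs : Nat) : Int) = n by omega] at hrev
    rw [hN, hn1, pvRange_cast, pvFoldl_scan, pvPsums_range, hrev, List.map_map]
    simp only [List.nil_append]
    apply List.map_congr_left
    intro k hk
    have hk' : k < n.natAbs + 1 := List.mem_range.mp hk
    simp only [Function.comp]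
    rw [pvSlice_sum n.natAbs k hk' (fun i : Nat => -(i : Int)), pvSum_neg]
    simp [pvS]
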